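-- pv_equiv track=rewrite | github.com/cheeseburgerhere/WebScraper | SingleSiteContents/singleSiteVer.py | inputSplitter
-- ===== SOURCE A (Python) =====
-- def inputSplitter(input:str): #sometimes scraped data comes without spaces and this function adds spaces accordingly
--     if(input == None):
--         return None
--     i:int=0
--     prevPointer : int=0
--     titlesString=""
--     while(i<len(input)-1):
--         c:chr=input[i]
--         afc: chr=input[i+1]
--         if((c>='A' and c<='Z' and afc>='a' and afc <='z')):
--             temp=input[prevPointer:i]
--             spaceString=" "
--
--             if(len(temp)<1):
--                 i+=1
--                 continue
--
--             if(temp[-1]==" "):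
--                 spaceString=""
--             if(temp[:9]=="Published"):
--                 titlesString+=temp[:9] +" "+ temp[9:]+spaceString
--             else:
--                 titlesString+=temp + spaceString
--
--             prevPointer=i
--         i+=1
--     return titlesString
-- ===== SOURCE B (Python) =====
-- def inputSplitter(input: str):
--     # Streaming rewrite: one pass over adjacent character pairs, growing the
--     # current segment char by char (no indices, no slicing of the input) and
--     # flushing it whenever an upper->lower boundary is seen with a non-empty
--     # segment in hand; the trailing segment is never flushed.
--     if input is None:
--         return None
--     out = []
--     seg = []
--     for c, nxt in zip(input, input[1:]):
--         if seg and 'A' <= c <= 'Z' and 'a' <= nxt <= 'z':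
--             s = ''.join(seg)
--             space = '' if s.endswith(' ') else ' '
--             if s.startswith('Published'):
--                 out.append(s[:9] + ' ' + s[9:] + space)
--             else:
--                 out.append(s + space)
--             seg = [c]
--         else:
--             seg.append(c)
--     return ''.join(out)
-- ===== Notes on version B (the rewrite author's own statement) =====
-- stated objective: alternative
-- what changed: A's index-based while-loop (scan index i, prevPointer, slicing input[prev:i] out of the whole string at each boundary, string += accumulation) is replaced by a streaming fold over adjacent character pairs that grows the current segment character by character in a list, flushes it at each boundary, and joins the emitted parts once; no indices or slices of the input.
import Mathlib
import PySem

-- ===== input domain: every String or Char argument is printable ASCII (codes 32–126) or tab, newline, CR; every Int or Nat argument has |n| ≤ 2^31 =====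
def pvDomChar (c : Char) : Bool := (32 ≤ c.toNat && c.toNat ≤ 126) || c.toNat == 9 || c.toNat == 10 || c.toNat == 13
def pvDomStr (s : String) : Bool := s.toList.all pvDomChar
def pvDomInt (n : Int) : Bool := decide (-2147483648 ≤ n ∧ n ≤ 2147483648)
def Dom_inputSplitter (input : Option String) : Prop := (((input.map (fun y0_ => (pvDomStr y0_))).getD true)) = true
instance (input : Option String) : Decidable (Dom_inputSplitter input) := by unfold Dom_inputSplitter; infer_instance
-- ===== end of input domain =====

-- B replaces A's index/slice while-loop by a streaming fold over adjacent character pairs that grows the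
-- current segment char by char and flushes it at each boundary; same return value (objective: alternative).

-- ===== PORT A =====
-- A's while-loop (fuel = remaining scan budget, a pure totality guard; i scans,
-- prevPointer marks the last used boundary, titlesString accumulates).
def pvLoopA (cs : List Char) (fuel i prev : Nat) (acc : List Char) : List Char :=
  match fuel with
  | 0 => acc
  | fuel + 1 =>
    if i < cs.length - 1 then
      let c := PySem.List.pyGetD cs (i : Int) ' '
      let afc := PySem.List.pyGetD cs ((i : Int) + 1) ' '
      if ('A' ≤ c && c ≤ 'Z' && 'a' ≤ afc && afc ≤ 'z') then
        let temp := PySem.List.slice cs (some (prev : Int)) (some (i : Int))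
        if temp.length < 1 then
          pvLoopA cs fuel (i+1) prev acc
        else
          let spaceString := if PySem.List.pyGet? temp (-1) = some ' ' then ([] : List Char) else [' ']
          if PySem.List.slice temp none (some 9) = "Published".toList then
            pvLoopA cs fuel (i+1) i (acc ++ PySem.List.slice temp none (some 9) ++ [' '] ++ PySem.List.slice temp (some 9) none ++ spaceString)
          else
            pvLoopA cs fuel (i+1) i (acc ++ temp ++ spaceString)
      else pvLoopA cs fuel (i+1) prev acc
    else acc

def inputSplitter (input : Option String) : Option String :=
  match input with
  | none => none
  | some s => some (String.ofList (pvLoopA s.toList s.toList.length 0 0 []))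

-- ===== PORT B =====
-- Source B: the part appended to out when the segment seg is flushed
def pvEmit (seg : List Char) : List Char :=
  let space := if PySem.Chars.endswith seg [' '] then ([] : List Char) else [' ']
  if PySem.Chars.startswith seg ("Published".toList) then
    PySem.List.slice seg none (some 9) ++ [' '] ++ PySem.List.slice seg (some 9) none ++ space
  else seg ++ space

-- Source B: the loop body, folded over the pairs zip(input, input[1:]); state = (seg, out)
def pvStep (st : List Char × List (List Char)) (p : Char × Char) : List Char × List (List Char) :=
  if (!st.1.isEmpty && 'A' ≤ p.1 && p.1 ≤ 'Z' && 'a' ≤ p.2 && p.2 ≤ 'z') then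
    ([p.1], st.2 ++ [pvEmit st.1])
  else (st.1 ++ [p.1], st.2)

def inputSplitter_alt (input : Option String) : Option String :=
  match input with
  | none => none
  | some s =>
    let cs := s.toList
    let st := (cs.zip cs.tail).foldl pvStep ([], [])
    some (String.ofList (PySem.Chars.join [] st.2))

-- ===== PRECONDITION & SPEC =====
def Spec_inputSplitter (input : Option String) (out : Option String) : Prop := out = inputSplitter_alt input
instance (input : Option String) (out : Option String) : Decidable (Spec_inputSplitter input out) := by unfold Spec_inputSplitter; infer_instance

-- ===== CLAIM (what is proved, stated in full; the proofs are below) =====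
def Claim_equal_inputSplitter : Prop := ∀ (input : Option String), Dom_inputSplitter input → Spec_inputSplitter input (inputSplitter input)

-- ===== LEMMAS AND PROOFS =====

-- proof-only helpers: the segment list determined by a boundary-index list
def pvPartsList (cs : List Char) (prev : Nat) (bl : List Nat) : List (List Char) :=
  match bl with
  | [] => []
  | cur :: t => pvEmit (PySem.List.slice cs (some (prev : Int)) (some (cur : Int))) :: pvPartsList cs cur t

def pvBnd (cs : List Char) (i : Nat) : Bool :=
  match cs[i]?, cs[i+1]? with
  | some c, some a => 'A' ≤ c && c ≤ 'Z' && 'a' ≤ a && a ≤ 'z'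
  | _, _ => false

def pvBl (cs : List Char) (i : Nat) : List Nat :=
  (List.range' i (cs.length - 1 - i)).filter (pvBnd cs)

lemma pv_join_flatten (parts : List (List Char)) : PySem.Chars.join [] parts = parts.flatten := by
  induction parts with
  | nil => rfl
  | cons p t ih => cases t with
    | nil => simp [PySem.Chars.join, List.intercalate]
    | cons q r => rw [PySem.Chars.join_cons_cons]; simp_all

lemma pv_suffix_singleton (l : List Char) (x : Char) : l ≠ [] → (([x] <:+ l) ↔ l.getLast? = some x) := by
  induction l with
  | nil => intro h; exact absurd rfl h
  | cons a t ih =>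
    intro _
    cases t with
    | nil => simp [List.suffix_cons_iff]; exact eq_comm
    | cons b r =>
      rw [List.suffix_cons_iff, List.getLast?_cons_cons, ih (List.cons_ne_nil b r)]
      simp

lemma pv_pyGet_neg_one (l : List Char) (h : l ≠ []) : PySem.List.pyGet? l (-1) = l.getLast? := by
  have h1 : 1 ≤ l.length := List.length_pos_of_ne_nil h
  simp [PySem.List.pyGet?, PySem.List.pyIdx?, h1, List.getLast?_eq_getElem?]

lemma pv_space_eq (temp : List Char) (h : temp ≠ []) :
    (if PySem.List.pyGet? temp (-1) = some ' ' then ([] : List Char) else [' '])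
      = (if PySem.Chars.endswith temp [' '] then ([] : List Char) else [' ']) := by
  rw [pv_pyGet_neg_one temp h]
  by_cases hc : temp.getLast? = some ' '
  · simp [hc, PySem.Chars.endswith, List.isSuffixOf_iff_suffix, (pv_suffix_singleton temp ' ' h).mpr hc]
  · have hs : PySem.Chars.endswith temp [' '] ≠ true := fun hs =>
      hc ((pv_suffix_singleton temp ' ' h).mp (List.isSuffixOf_iff_suffix.mp hs))
    simp [hc, hs]

lemma pv_pub_eq (temp : List Char) :
    (PySem.List.slice temp none (some 9) = "Published".toList)
      ↔ PySem.Chars.startswith temp ("Published".toList) = true := by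
  rw [PySem.List.slice_to temp (by norm_num)]
  have h9 : (9 : Int).toNat = 9 := rfl
  rw [h9]
  unfold PySem.Chars.startswith
  rw [List.isPrefixOf_iff_prefix]
  constructor
  · intro he; rw [← he]; exact List.take_prefix 9 temp
  · intro hp
    obtain ⟨rest, hrest⟩ := hp
    rw [← hrest, List.take_append_of_le_length (by decide)]
    decide

lemma pv_bl_step (cs : List Char) (i : Nat) (h : i < cs.length - 1) :
    pvBl cs i = (if pvBnd cs i then [i] else []) ++ pvBl cs (i+1) := by
  unfold pvBl
  have : cs.length - 1 - i = (cs.length - 1 - (i+1)) + 1 := by omega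
  rw [this, List.range'_succ, List.filter_cons]
  by_cases hb : pvBnd cs i <;> simp [hb]

lemma pv_bl_nil (cs : List Char) (i : Nat) (h : ¬ i < cs.length - 1) : pvBl cs i = [] := by
  unfold pvBl
  have : cs.length - 1 - i = 0 := by omega
  rw [this]; rfl

lemma pv_mem_bl (cs : List Char) (i j : Nat) (h : j ∈ pvBl cs i) : i ≤ j ∧ j < cs.length - 1 ∧ pvBnd cs j := by
  unfold pvBl at h
  have h1 := List.of_mem_filter h
  have h2 := List.mem_of_mem_filter h
  rw [List.mem_range'_1] at h2
  exact ⟨h2.1, by omega, h1⟩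

lemma pv_loopA_eq (cs : List Char) : ∀ (fuel i prev : Nat) (acc : List Char),
    cs.length - 1 - i ≤ fuel → (∀ j ∈ pvBl cs i, prev < j) →
    pvLoopA cs fuel i prev acc = acc ++ (pvPartsList cs prev (pvBl cs i)).flatten := by
  intro fuel
  induction fuel with
  | zero =>
    intro i prev acc hk hlt
    rw [pv_bl_nil cs i (by omega)]
    simp [pvLoopA, pvPartsList]
  | succ k ih =>
    intro i prev acc hk hlt
    by_cases hi : i < cs.length - 1
    · have h1 : i < cs.length := by omega
      have h2 : i + 1 < cs.length := by omega
      have hg1 : PySem.List.pyGetD cs (i : Int) ' ' = cs[i] := by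
        rw [PySem.List.pyGetD_eq_getElem cs ' ' (by omega) (by exact_mod_cast h1)]; simp
      have hg2 : PySem.List.pyGetD cs ((i : Int) + 1) ' ' = cs[i+1] := by
        rw [show ((i : Int) + 1) = ((i + 1 : Nat) : Int) by push_cast; ring]
        rw [PySem.List.pyGetD_eq_getElem cs ' ' (by omega) (by exact_mod_cast h2)]; simp
      have hbnd : pvBnd cs i = ('A' ≤ cs[i] && cs[i] ≤ 'Z' && 'a' ≤ cs[i+1] && cs[i+1] ≤ 'z') := by
        unfold pvBnd
        rw [List.getElem?_eq_getElem h1, List.getElem?_eq_getElem h2]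
      rw [pvLoopA]
      simp only [hg1, hg2]
      rw [if_pos hi]
      by_cases hb : ('A' ≤ cs[i] && cs[i] ≤ 'Z' && 'a' ≤ cs[i+1] && cs[i+1] ≤ 'z') = true
      · -- boundary at i
        have hbl : pvBl cs i = i :: pvBl cs (i+1) := by
          rw [pv_bl_step cs i hi, if_pos (by rw [hbnd]; exact hb)]; rfl
        have hpi : prev < i := hlt i (by rw [hbl]; exact List.mem_cons_self)
        have htlen : (PySem.List.slice cs (some (prev : Int)) (some (i : Int))).length = i - prev := by
          rw [PySem.List.length_slice]
          simp
          omega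
        have htne : PySem.List.slice cs (some (prev : Int)) (some (i : Int)) ≠ [] := by
          intro he; rw [he] at htlen; simp at htlen; omega
        simp only [hb, if_true]
        rw [if_neg (by omega)]
        have hrec : ∀ Y, pvLoopA cs k (i+1) i Y = Y ++ (pvPartsList cs i (pvBl cs (i+1))).flatten := by
          intro Y
          exact ih (i+1) i Y (by omega)
            (fun j hj => by have := pv_mem_bl cs (i+1) j hj; omega)
        rw [hbl]
        show _ = acc ++ (pvEmit (PySem.List.slice cs (some (prev : Int)) (some (i : Int))) :: pvPartsList cs i (pvBl cs (i+1))).flatten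
        set temp := PySem.List.slice cs (some (prev : Int)) (some (i : Int)) with htemp
        rw [pv_space_eq temp htne]
        by_cases hp : PySem.List.slice temp none (some 9) = "Published".toList
        · rw [if_pos hp, hrec]
          unfold pvEmit
          rw [if_pos ((pv_pub_eq temp).mp hp)]
          simp
        · rw [if_neg hp, hrec]
          unfold pvEmit
          rw [if_neg (fun hs => hp ((pv_pub_eq temp).mpr hs))]
          simp
      · -- no boundary at i
        have hbl : pvBl cs i = pvBl cs (i+1) := by
          rw [pv_bl_step cs i hi, if_neg (by rw [hbnd]; exact hb)]; rfl
        simp only [hb]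
        rw [hbl]
        exact ih (i+1) prev acc (by omega) (fun j hj => hlt j (by rw [hbl]; exact hj))
    · rw [pv_bl_nil cs i hi]
      rw [pvLoopA]
      simp [hi, pvPartsList]

-- B-side invariant: folding the remaining pairs from position i, with the current segment
-- cs[prev:i] in hand, appends exactly the parts for the remaining boundaries.
lemma pv_foldB_inv (cs : List Char) : ∀ (fuel i prev : Nat) (parts : List (List Char)),
    cs.length - i ≤ fuel → (prev < i ∨ (prev = 0 ∧ i = 0)) →
    (((cs.drop i).zip (cs.drop (i+1))).foldl pvStep
        (PySem.List.slice cs (some (prev : Int)) (some (i : Int)), parts)).2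
      = parts ++ pvPartsList cs prev (pvBl cs (max i 1)) := by
  intro fuel
  induction fuel with
  | zero =>
    intro i prev parts hk hpi
    have hlen : cs.length ≤ i := by omega
    rw [List.drop_eq_nil_of_le hlen, List.zip_nil_left, List.foldl_nil,
        pv_bl_nil cs (max i 1) (by omega)]
    simp [pvPartsList]
  | succ k ih =>
    intro i prev parts hk hpi
    by_cases hi : i < cs.length - 1
    · have h1 : i < cs.length := by omega
      have h2 : i + 1 < cs.length := by omega
      have hd1 : cs.drop i = cs[i] :: cs.drop (i+1) := (List.getElem_cons_drop h1).symm
      have hd2 : cs.drop (i+1) = cs[i+1] :: cs.drop (i+1+1) := (List.getElem_cons_drop h2).symm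
      have hbnd : pvBnd cs i = ('A' ≤ cs[i] && cs[i] ≤ 'Z' && 'a' ≤ cs[i+1] && cs[i+1] ≤ 'z') := by
        unfold pvBnd
        rw [List.getElem?_eq_getElem h1, List.getElem?_eq_getElem h2]
      have hzip : (cs.drop i).zip (cs.drop (i+1))
          = (cs[i], cs[i+1]) :: (cs.drop (i+1)).zip (cs.drop (i+1+1)) := by
        conv_lhs => rw [hd1, hd2]
        rw [List.zip_cons_cons, ← hd2]
      have hseg : PySem.List.slice cs (some (prev : Int)) (some (i : Int)) = (cs.drop prev).take (i - prev) :=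
        PySem.List.slice_natCast cs prev i
      rw [hzip, List.foldl_cons]
      rcases hpi with hpi | ⟨hp0, hi0⟩
      · -- i ≥ 1, the segment cs[prev:i] is nonempty
        have hne : ((cs.drop prev).take (i - prev)).isEmpty = false := by
          rw [List.isEmpty_eq_false_iff_exists_mem]
          have hlen : ((cs.drop prev).take (i - prev)).length = i - prev := by
            rw [List.length_take, List.length_drop]; omega
          have hpos : 0 < ((cs.drop prev).take (i - prev)).length := by omega
          exact ⟨_, List.getElem_mem hpos⟩
        rw [hseg]
        by_cases hb : ('A' ≤ cs[i] && cs[i] ≤ 'Z' && 'a' ≤ cs[i+1] && cs[i+1] ≤ 'z') = true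
        · -- boundary: flush the segment
          have hbl : pvBl cs (max i 1) = i :: pvBl cs (i+1) := by
            have hmax : max i 1 = i := by omega
            rw [hmax, pv_bl_step cs i hi, if_pos (by rw [hbnd]; exact hb)]; rfl
          have hstep : pvStep ((cs.drop prev).take (i - prev), parts) (cs[i], cs[i+1])
              = ([cs[i]], parts ++ [pvEmit ((cs.drop prev).take (i - prev))]) := by
            unfold pvStep
            rw [if_pos (by simp only [Bool.and_eq_true] at hb ⊢; exact ⟨⟨⟨⟨by simp [hne], hb.1.1.1⟩, hb.1.1.2⟩, hb.1.2⟩, hb.2⟩)]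
          rw [hstep]
          have hseg1 : ([cs[i]] : List Char) = PySem.List.slice cs (some ((i : Nat) : Int)) (some (((i+1 : Nat)) : Int)) := by
            rw [PySem.List.slice_natCast]
            have h1i : i + 1 - i = 1 := by omega
            rw [h1i, hd1]
            rfl
          rw [hseg1]
          have hih := ih (i+1) i (parts ++ [pvEmit ((cs.drop prev).take (i - prev))]) (by omega) (by omega)
          rw [hih, hbl]
          have hmax1 : max (i+1) 1 = i + 1 := by omega
          rw [hmax1]
          simp [pvPartsList, hseg]
        · -- no boundary: extend the segment
          have hbl : pvBl cs (max i 1) = pvBl cs (i+1) := by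
            have hmax : max i 1 = i := by omega
            rw [hmax, pv_bl_step cs i hi, if_neg (by rw [hbnd]; exact hb)]; rfl
          have hstep : pvStep ((cs.drop prev).take (i - prev), parts) (cs[i], cs[i+1])
              = ((cs.drop prev).take (i - prev) ++ [cs[i]], parts) := by
            unfold pvStep
            rw [if_neg (fun hc => hb (by simp only [Bool.and_eq_true] at hc ⊢; exact ⟨⟨⟨hc.1.1.1.2, hc.1.1.2⟩, hc.1.2⟩, hc.2⟩))]
          rw [hstep]
          have hsegext : (cs.drop prev).take (i - prev) ++ [cs[i]] = (cs.drop prev).take (i + 1 - prev) := by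
            have he : i + 1 - prev = (i - prev) + 1 := by omega
            rw [he, List.take_add_one]
            have hidx : (cs.drop prev)[i - prev]? = some cs[i] := by
              rw [List.getElem?_drop]
              rw [List.getElem?_eq_getElem (by omega : prev + (i - prev) < cs.length)]
              congr 1
              congr 1
              omega
            rw [hidx]
            rfl
          have hnext : (cs.drop prev).take (i + 1 - prev) = PySem.List.slice cs (some ((prev : Nat) : Int)) (some (((i+1 : Nat)) : Int)) :=
            (PySem.List.slice_natCast cs prev (i+1)).symm
          rw [hsegext, hnext]
          have hih := ih (i+1) prev parts (by omega) (by omega)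
          rw [hih, hbl]
          have hmax1 : max (i+1) 1 = i + 1 := by omega
          rw [hmax1]
      · -- i = 0: the segment is empty, a boundary here is skipped
        subst hp0; subst hi0
        have hsl : PySem.List.slice cs (some ((0 : Nat) : Int)) (some ((0 : Nat) : Int)) = [] := by
          rw [PySem.List.slice_natCast]; simp
        rw [hsl]
        have hstep : pvStep ([], parts) (cs[0], cs[0+1]) = ([cs[0]], parts) := by
          unfold pvStep
          simp
        rw [hstep]
        have hseg1 : ([cs[0]] : List Char) = PySem.List.slice cs (some ((0 : Nat) : Int)) (some (((1 : Nat)) : Int)) := by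
          rw [PySem.List.slice_natCast]
          obtain ⟨a, t, hat⟩ : ∃ a t, cs = a :: t := by
            cases cs with
            | nil => simp at h1
            | cons a t => exact ⟨a, t, rfl⟩
          subst hat
          rfl
        rw [hseg1]
        have hih := ih 1 0 parts (by omega) (by omega)
        rw [show (0 + 1 : Nat) = 1 from rfl] at *
        rw [hih]
        norm_num
    · -- no more pairs
      have hnil : cs.drop (i+1) = [] := List.drop_eq_nil_of_le (by omega)
      rw [hnil, List.zip_nil_right, List.foldl_nil, pv_bl_nil cs (max i 1) (by omega)]
      simp [pvPartsList]

-- ===== VERDICT (by name: the statement is the Claim_ definition above) =====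
theorem inputSplitter_spec : Claim_equal_inputSplitter := by
  intro input _
  unfold Spec_inputSplitter inputSplitter inputSplitter_alt
  cases input with
  | none => rfl
  | some s =>
    simp only []
    congr 1
    rw [pv_join_flatten]
    -- B side: the zip-fold over all pairs
    have hB : ((s.toList.zip s.toList.tail).foldl pvStep ([], [])).2
        = pvPartsList s.toList 0 (pvBl s.toList 1) := by
      have h0 : PySem.List.slice s.toList (some ((0 : Nat) : Int)) (some ((0 : Nat) : Int)) = [] := by
        rw [PySem.List.slice_natCast]; simp
      have := pv_foldB_inv s.toList s.toList.length 0 0 [] (by omega) (by omega)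
      rw [h0] at this
      simpa [List.drop_one] using this
    rw [hB]
    congr 1
    -- A side
    have hmain : ∀ j ∈ pvBl s.toList 1, 0 < j := by
      intro j hj; have := pv_mem_bl s.toList 1 j hj; omega
    by_cases h0 : 0 < s.toList.length - 1
    · obtain ⟨m, hm⟩ : ∃ m, s.toList.length = m + 1 := ⟨s.toList.length - 1, by omega⟩
      rw [hm, pvLoopA]
      rw [if_pos (by omega : 0 < s.toList.length - 1)]
      have hsl : PySem.List.slice s.toList (some ((0:Nat) : Int)) (some ((0:Nat) : Int)) = [] := by
        rw [PySem.List.slice_natCast]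
        simp
      by_cases hb : ('A' ≤ PySem.List.pyGetD s.toList ((0:Nat) : Int) ' ' && PySem.List.pyGetD s.toList ((0:Nat) : Int) ' ' ≤ 'Z' && 'a' ≤ PySem.List.pyGetD s.toList (((0:Nat) : Int) + 1) ' ' && PySem.List.pyGetD s.toList (((0:Nat) : Int) + 1) ' ' ≤ 'z') = true
      · simp only [Nat.cast_zero] at hb ⊢
        rw [if_pos hb]
        rw [if_pos (by rw [show ((0:Nat):Int) = (0:Int) from rfl] at hsl; rw [hsl]; decide)]
        exact pv_loopA_eq s.toList m 1 0 [] (by omega) hmain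
      · simp only [Nat.cast_zero] at hb ⊢
        rw [if_neg hb]
        exact pv_loopA_eq s.toList m 1 0 [] (by omega) hmain
    · rw [pv_bl_nil s.toList 1 (by omega)]
      have : s.toList.length = 0 ∨ s.toList.length = 1 := by omega
      rcases this with h | h <;> rw [h] <;> simp [pvLoopA, pvPartsList, h]
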